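-- pv_equiv track=rewrite | github.com/javipalanca/clyps | clyps/rete/nodes.py | unify
-- ===== SOURCE A (Python) =====
-- def unify(pattern1, pattern2):
--     """Unifica dos patrones y devuelve un mapeo de variables a valores si la unificación es exitosa."""
--     bindings = {}
--     for var, value in zip(pattern1, pattern2):
--         if var.startswith("?"):
--             if var not in bindings:
--                 bindings[var] = value
--             elif bindings[var] != value:
--                 return None  # Fallo en la unificación
--         elif var != value:
--             return None  # Fallo en la unificación
--     return bindings
-- ===== SOURCE B (Python) =====
-- def unify(pattern1, pattern2):
--     """Build-a-table-then-validate: collect all values per variable, check constants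
--     and per-variable consistency in separate passes, then project first values."""
--     pairs = list(zip(pattern1, pattern2))
--     if any(not var.startswith("?") and var != value for var, value in pairs):
--         return None
--     seen = {}
--     for var, value in pairs:
--         if var.startswith("?"):
--             seen[var] = seen.get(var, []) + [value]
--     for vals in seen.values():
--         if any(v != vals[0] for v in vals):
--             return None
--     return {var: vals[0] for var, vals in seen.items()}
-- ===== Notes on version B (the rewrite author's own statement) =====
-- stated objective: alternative
-- what changed: Replaced A's single early-exit scan carrying a bindings dict by a build-then-validate decomposition: one pass collects every value seen per variable into a table and one any() pass checks constants, a separate pass validates each variable's value list, and the result is projected as first values.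
import Mathlib
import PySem

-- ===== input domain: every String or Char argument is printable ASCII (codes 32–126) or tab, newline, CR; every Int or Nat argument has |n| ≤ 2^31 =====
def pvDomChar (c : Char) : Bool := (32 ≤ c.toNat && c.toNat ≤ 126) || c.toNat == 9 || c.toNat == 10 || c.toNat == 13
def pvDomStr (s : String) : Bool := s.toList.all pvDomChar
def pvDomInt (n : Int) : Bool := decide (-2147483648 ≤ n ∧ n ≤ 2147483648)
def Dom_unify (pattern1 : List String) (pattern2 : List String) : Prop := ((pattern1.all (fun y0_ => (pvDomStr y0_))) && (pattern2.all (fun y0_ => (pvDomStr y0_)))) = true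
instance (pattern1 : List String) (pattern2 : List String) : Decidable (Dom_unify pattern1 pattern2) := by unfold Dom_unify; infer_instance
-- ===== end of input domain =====

-- B replaces A's single early-exit scan by a build-a-table-then-validate decomposition (same value on every input; no speed claim).


-- ===== PORT A =====
-- A's loop over zip(pattern1, pattern2) carrying the bindings dict, early return None on mismatch.
-- 'bindings[var]' is ported as 'getD v ""': it is guarded by 'contains', so the default is never read (exact).
def unifyGo : List (String × String) → PySem.Dict String String → Option (PySem.Dict String String)
  | [], b => some b
  | (v, x) :: rest, b =>
    if PySem.Str.startswith v "?" then
      if b.contains v = false then unifyGo rest (b.insert v x)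
      else if b.getD v "" ≠ x then none
      else unifyGo rest b
    else if v ≠ x then none
    else unifyGo rest b

def unify (pattern1 : List String) (pattern2 : List String) : Option (List (String × String)) :=
  (unifyGo (pattern1.zip pattern2) PySem.Dict.empty).map (fun b => b.items)

-- ===== PORT B =====
-- constant mismatch test for one pair (B's first any() pass)
def pvCBad (p : String × String) : Bool := !(PySem.Str.startswith p.1 "?") && p.1 != p.2
-- one step of B's collecting loop: seen[var] = seen.get(var, []) + [value]
def pvStep (d : PySem.Dict String (List String)) (p : String × String) : PySem.Dict String (List String) :=
  if PySem.Str.startswith p.1 "?" then d.insert p.1 (d.getD p.1 [] ++ [p.2]) else d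
-- B's per-variable validation: any(v != vals[0] for v in vals).
-- 'vals[0]' is ported as 'headD ""': every list the collecting loop stores is nonempty, so the default is never read (exact).
def pvBadVals (vals : List String) : Bool := vals.any (fun v => v != vals.headD "")

def unify_alt (pattern1 : List String) (pattern2 : List String) : Option (List (String × String)) :=
  let pairs := pattern1.zip pattern2
  if pairs.any pvCBad then none
  else
    let seen := pairs.foldl pvStep PySem.Dict.empty
    if seen.values.any pvBadVals then none
    else some (seen.items.map (fun p => (p.1, p.2.headD "")))

-- ===== PRECONDITION & SPEC =====
def Spec_unify (pattern1 : List String) (pattern2 : List String) (out : Option (List (String × String))) : Prop := out = unify_alt pattern1 pattern2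
instance (pattern1 : List String) (pattern2 : List String) (out : Option (List (String × String))) : Decidable (Spec_unify pattern1 pattern2 out) := by unfold Spec_unify; infer_instance

-- ===== CLAIM (what is proved, stated in full; the proofs are below) =====
def Claim_equal_unify : Prop := ∀ (pattern1 : List String) (pattern2 : List String), Dom_unify pattern1 pattern2 → Spec_unify pattern1 pattern2 (unify pattern1 pattern2)

-- ===== LEMMAS AND PROOFS =====
-- projection of a table entry to a binding: (var, first value)
def pvF (p : String × List String) : String × String := (p.1, p.2.headD "")
-- invariant: every stored list is a nonempty run of one repeated value
def pvGood (d : PySem.Dict String (List String)) : Prop :=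
  ∀ p ∈ d.items, ∃ (n : Nat) (w : String), p.2 = List.replicate (n + 1) w

theorem pvrep (n : Nat) (w : String) : pvBadVals (List.replicate (n+1) w) = false := by
  simp [pvBadVals, List.replicate_succ]
theorem pvGood_badVals_false {d : PySem.Dict String (List String)} (h : pvGood d) :
    d.values.any pvBadVals = false := by
  simp only [PySem.Dict.values, List.any_map, List.any_eq_false]
  intro p hp
  obtain ⟨n, w, hw⟩ := h p hp
  simp [Function.comp, hw, pvrep]
theorem pvBadVals_append (l : List String) (y : String) (h : pvBadVals l = true) : pvBadVals (l ++ [y]) = true := by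
  rcases l with _ | ⟨a, t⟩
  · simp [pvBadVals] at h
  · simp [pvBadVals] at h ⊢
    obtain ⟨v, hv, hne⟩ := h
    exact Or.inl ⟨v, hv, hne⟩
theorem pvBadAt_step {d : PySem.Dict String (List String)} {k : String}
    (h : pvBadVals (d.getD k []) = true) (p : String × String) :
    pvBadVals ((pvStep d p).getD k []) = true := by
  unfold pvStep
  split
  · rw [PySem.Dict.getD_insert]
    split
    · next heq => subst heq; exact pvBadVals_append _ _ h
    · exact h
  · exact h
theorem pvBadAt_foldl {d : PySem.Dict String (List String)} {k : String}
    (h : pvBadVals (d.getD k []) = true) (ps : List (String × String)) :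
    pvBadVals ((ps.foldl pvStep d).getD k []) = true := by
  induction ps generalizing d with
  | nil => exact h
  | cons p ps ih => exact ih (pvBadAt_step h p)
theorem pvBadAt_values {d : PySem.Dict String (List String)} {k : String}
    (h : pvBadVals (d.getD k []) = true) :
    d.values.any pvBadVals = true := by
  have hne : d.getD k [] ≠ [] := by
    intro he; rw [he] at h; simp [pvBadVals] at h
  have hc : d.contains k = true := by
    by_contra hc
    exact hne (PySem.Dict.getD_of_not_contains d [] (by simpa using hc))
  have hg : d.get? k = some (d.getD k []) := by
    rw [PySem.Dict.contains_eq_isSome_get?] at hc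
    rcases hx : d.get? k with _ | v
    · exact absurd hc (by simp [hx])
    · rw [PySem.Dict.getD_of_get?_eq_some d [] hx]
  have hm := PySem.Dict.mem_items_of_get?_eq_some d hg
  simp only [PySem.Dict.values, List.any_map, List.any_eq_true]
  exact ⟨_, hm, h⟩

theorem pvKeys_eq {b : PySem.Dict String String} {d : PySem.Dict String (List String)}
    (hb : b.items = d.items.map pvF) : b.keys = d.keys := by
  simp only [PySem.Dict.keys, hb, List.map_map]
  rfl

theorem pvContains_eq {b : PySem.Dict String String} {d : PySem.Dict String (List String)}
    (hb : b.items = d.items.map pvF) (k : String) : b.contains k = d.contains k := by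
  rw [PySem.Dict.contains_eq_decide_mem_keys, PySem.Dict.contains_eq_decide_mem_keys, pvKeys_eq hb]

theorem pvBadRep (n : Nat) (w x : String) (hxw : x ≠ w) :
    pvBadVals (List.replicate (n+1) w ++ [x]) = true := by
  simp only [pvBadVals, List.any_eq_true]
  refine ⟨x, by simp, ?_⟩
  simpa [List.replicate_succ] using hxw

theorem pvMain (ps : List (String × String)) :
    ∀ (b : PySem.Dict String String) (d : PySem.Dict String (List String)),
      d.keys.Nodup → b.items = d.items.map pvF → pvGood d →
      (unifyGo ps b).map (fun b => b.items) =
        (if ps.any pvCBad then none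
         else if (ps.foldl pvStep d).values.any pvBadVals then none
         else some ((ps.foldl pvStep d).items.map pvF)) := by
  induction ps with
  | nil =>
    intro b d hn hb hg
    simp [unifyGo, pvGood_badVals_false hg, hb]
  | cons p ps ih =>
    intro b d hn hb hg
    obtain ⟨v, x⟩ := p
    by_cases hsw : PySem.Str.startswith v "?" = true
    · -- variable position
      have hs : PySem.Chars.startswith v.toList ['?'] = true := by simpa using hsw
      have hcb : pvCBad (v, x) = false := by simp [pvCBad, hs]
      have hstep : pvStep d (v, x) = d.insert v (d.getD v [] ++ [x]) := by simp [pvStep, hs]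
      rw [List.any_cons, hcb, Bool.false_or, List.foldl_cons, hstep]
      by_cases hc : b.contains v = true
      · -- already bound
        have hdc : d.contains v = true := by rw [← pvContains_eq hb]; exact hc
        -- the entry (v, l) of d
        have hgv : b.get? v = some (b.getD v "") := by
          rw [PySem.Dict.contains_eq_isSome_get?] at hc
          rcases hx : b.get? v with _ | w
          · exact absurd hc (by simp [hx])
          · rw [PySem.Dict.getD_of_get?_eq_some b "" hx]
        have hbm : (v, b.getD v "") ∈ b.items := PySem.Dict.mem_items_of_get?_eq_some b hgv
        rw [hb] at hbm
        obtain ⟨q, hq, hfq⟩ := List.mem_map.mp hbm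
        obtain ⟨n, w, hw⟩ := hg q hq
        have hq1 : q.1 = v := by
          have := congrArg Prod.fst hfq; simpa [pvF] using this
        have hhead : b.getD v "" = w := by
          have : (pvF q).2 = b.getD v "" := by rw [hfq]
          simpa [pvF, hw, List.replicate_succ] using this.symm
        have hql : (v, List.replicate (n+1) w) ∈ d.items := by
          have : q = (v, List.replicate (n+1) w) := by
            obtain ⟨q1, q2⟩ := q; simp at hq1 hw; rw [hq1, hw]
          rwa [this] at hq
        have hdg : d.getD v [] = List.replicate (n+1) w :=
          PySem.Dict.getD_of_mem_items d hql hn []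
        by_cases hvx : b.getD v "" = x
        · -- consistent repeat: A keeps going, B's entry stays a run of w
          have hxw : x = w := by rw [← hvx, hhead]
          have hA : unifyGo ((v, x) :: ps) b = unifyGo ps b := by
            simp [unifyGo, hs, hc, hvx]
          rw [hA]
          have hl : d.getD v [] ++ [x] = List.replicate (n+2) w := by
            rw [hdg, hxw, ← List.replicate_succ']
          rw [hl]
          apply ih b (d.insert v (List.replicate (n+2) w))
            (PySem.Dict.nodup_keys_insert d v _ hn)
          · -- items correspondence preserved
            rw [PySem.Dict.items_insert_of_contains d _ hdc, List.map_map, hb]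
            apply List.map_congr_left
            intro a ha
            by_cases hav : a.1 = v
            · have ha2 : a.2 = List.replicate (n+1) w := by
                have h1 : d.get? v = some a.2 := by
                  rw [← hav] at *
                  exact (PySem.Dict.get?_eq_some_iff_mem_items d a.1 a.2 hn).mpr (by simpa using ha)
                have h2 : d.get? v = some (List.replicate (n+1) w) :=
                  (PySem.Dict.get?_eq_some_iff_mem_items d v _ hn).mpr hql
                rw [h1] at h2; exact Option.some_injective _ h2
              simp [Function.comp, pvF, hav, ha2, List.replicate_succ]
            · simp [Function.comp, pvF, hav]
          · -- pvGood preserved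
            intro a ha
            rw [PySem.Dict.items_insert_of_contains d _ hdc] at ha
            obtain ⟨a0, ha0, hfa⟩ := List.mem_map.mp ha
            by_cases h0 : (a0.1 == v) = true
            · rw [← hfa]
              refine ⟨n+1, w, ?_⟩
              simp [h0]
            · rw [← hfa]; simp [h0]; exact hg a0 ha0
        · -- conflicting repeat: A returns None; B's entry for v becomes inconsistent for good
          have hA : unifyGo ((v, x) :: ps) b = none := by
            simp [unifyGo, hs, hc, hvx]
          rw [hA]
          have hxw : x ≠ w := fun h => hvx (by rw [hhead, h])
          have hbad : pvBadVals ((d.insert v (d.getD v [] ++ [x])).getD v []) = true := by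
            rw [PySem.Dict.getD_insert, if_pos rfl, hdg]
            exact pvBadRep n w x hxw
          have := pvBadAt_values (pvBadAt_foldl hbad ps)
          rw [this]
          simp
      · -- fresh variable
        have hc' : b.contains v = false := by simpa using hc
        have hdc : d.contains v = false := by rw [← pvContains_eq hb]; exact hc'
        have hA : unifyGo ((v, x) :: ps) b = unifyGo ps (b.insert v x) := by
          simp [unifyGo, hs, hc']
        rw [hA, PySem.Dict.getD_of_not_contains d [] hdc, List.nil_append]
        apply ih (b.insert v x) (d.insert v [x])
          (PySem.Dict.nodup_keys_insert d v _ hn)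
        · rw [PySem.Dict.items_insert_of_not_contains d _ hdc,
              PySem.Dict.items_insert_of_not_contains b _ hc', hb]
          simp [pvF]
        · intro a ha
          rw [PySem.Dict.items_insert_of_not_contains d _ hdc] at ha
          rcases List.mem_append.mp ha with h1 | h1
          · exact hg a h1
          · simp at h1; rw [h1]; exact ⟨0, x, rfl⟩
    · -- constant position
      have hs : PySem.Chars.startswith v.toList ['?'] = false := by
        simpa [PySem.Str.startswith_eq] using (Bool.not_eq_true _).mp hsw
      have hstep : pvStep d (v, x) = d := by simp [pvStep, hs]
      rw [List.any_cons, List.foldl_cons, hstep]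
      by_cases hvx : v = x
      · have hcb : pvCBad (v, x) = false := by simp [pvCBad, hvx]
        have hA : unifyGo ((v, x) :: ps) b = unifyGo ps b := by
          subst hvx; simp [unifyGo, hs]
        rw [hA, hcb, Bool.false_or]
        exact ih b d hn hb hg
      · have hcb : pvCBad (v, x) = true := by simp [pvCBad, hs, hvx]
        have hA : unifyGo ((v, x) :: ps) b = none := by
          simp [unifyGo, hs, hvx]
        rw [hA, hcb]
        simp

-- ===== VERDICT (by name: the statement is the Claim_ definition above) =====
theorem unify_spec : Claim_equal_unify := by
  intro p1 p2 _
  unfold Spec_unify unify unify_alt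
  have := pvMain (p1.zip p2) PySem.Dict.empty PySem.Dict.empty
    PySem.Dict.nodup_keys_empty rfl (by intro p hp; simp [PySem.Dict.empty] at hp)
  exact this
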